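-- pv_equiv track=rewrite | github.com/Daizman/algs | py/numberFromSum.py | calculate
-- ===== SOURCE A (Python) =====
-- def calculate(n):
--     answer = []
--     i = 1
--     while n > i * 2:
--         answer.append(i)
--         n -= i
--         i += 1
--     answer.append(n)
--     return answer
-- ===== SOURCE B (Python) =====
-- def calculate(n):
--     # closed-form: A returns [1, 2, ..., k, n - k*(k+1)//2] where k is the
--     # least k >= 0 with 2*n <= (k+1)*(k+4); find k by binary search instead
--     # of A's step-by-step subtraction loop.
--     if n <= 2:
--         return [n]
--     hi = 1
--     while (hi + 1) * (hi + 4) < 2 * n: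
--         hi *= 2
--     lo = 0
--     while lo < hi:
--         mid = (lo + hi) // 2
--         if 2 * n <= (mid + 1) * (mid + 4):
--             hi = mid
--         else:
--             lo = mid + 1
--     k = lo
--     return list(range(1, k + 1)) + [n - k * (k + 1) // 2]
-- ===== Notes on version B (the rewrite author's own statement) =====
-- stated objective: alternative
-- what changed: B computes the loop count k directly as the least k with 2n <= (k+1)(k+4) via exponential + binary search and builds the result with range and a closed-form remainder, instead of A's step-by-step subtraction loop.
import Mathlib
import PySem

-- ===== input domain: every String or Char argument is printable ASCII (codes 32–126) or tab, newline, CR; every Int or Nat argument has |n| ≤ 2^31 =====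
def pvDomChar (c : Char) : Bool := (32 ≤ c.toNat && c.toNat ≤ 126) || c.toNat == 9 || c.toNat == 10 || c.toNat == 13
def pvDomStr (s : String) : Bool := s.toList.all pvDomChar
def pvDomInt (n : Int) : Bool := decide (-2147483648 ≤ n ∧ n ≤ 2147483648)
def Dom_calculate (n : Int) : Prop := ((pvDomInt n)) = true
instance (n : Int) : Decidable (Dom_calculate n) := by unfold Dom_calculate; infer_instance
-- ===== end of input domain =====

-- B finds the loop count k by exponential + binary search and a closed-form remainder instead of A's step-by-step subtraction loop (objective: alternative algorithm).

-- ===== PORT A =====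
-- A's while loop; the '1 ≤ i' conjunct is a totality guard only: A always starts at i = 1 and increments.
def calcLoopA (n i : Int) (acc : List Int) : List Int :=
  if h : i * 2 < n ∧ 1 ≤ i then
    calcLoopA (n - i) (i + 1) (acc ++ [i])
  else acc ++ [n]
termination_by (n - 2 * i).toNat
decreasing_by
  obtain ⟨h1, h2⟩ := h
  omega

def calculate (n : Int) : List Int := calcLoopA n 1 []

-- ===== PORT B =====
-- exponential search: double hi until (hi+1)*(hi+4) ≥ 2n ('1 ≤ hi' is a totality guard; B starts at hi = 1)
def findHiB (n hi : Int) : Int :=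
  if h : (hi + 1) * (hi + 4) < 2 * n ∧ 1 ≤ hi then findHiB n (2 * hi) else hi
termination_by (2 * n - hi).toNat
decreasing_by
  obtain ⟨h1, h2⟩ := h
  have hlt : hi < 2 * n := by nlinarith
  omega

-- binary search for the least k with 2n ≤ (k+1)*(k+4)
def bsearchB (n lo hi : Int) : Int :=
  if h : lo < hi then
    let mid := PySem.Int.floordiv (lo + hi) 2
    if 2 * n ≤ (mid + 1) * (mid + 4) then bsearchB n lo mid else bsearchB n (mid + 1) hi
  else lo
termination_by (hi - lo).toNat
decreasing_by
  · have := PySem.Int.floordiv_two_mid_bounds (lo := lo) (hi := hi) (le_of_lt h)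
    have : PySem.Int.floordiv (lo + hi) 2 < hi := by
      have h2 : PySem.Int.floordiv (lo + hi) 2 = (lo + hi) / 2 := PySem.Int.floordiv_eq_ediv_of_pos (by norm_num)
      omega
    omega
  · have := PySem.Int.floordiv_two_mid_bounds (lo := lo) (hi := hi) (le_of_lt h)
    omega

def calculate_alt (n : Int) : List Int :=
  if n ≤ 2 then [n]
  else
    let hi := findHiB n 1
    let k := bsearchB n 0 hi
    PySem.List.pyRange 1 (k + 1) 1 ++ [n - PySem.Int.floordiv (k * (k + 1)) 2]

-- ===== PRECONDITION & SPEC =====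
def Spec_calculate (n : Int) (out : List Int) : Prop := out = calculate_alt n
instance (n : Int) (out : List Int) : Decidable (Spec_calculate n out) := by unfold Spec_calculate; infer_instance

-- ===== CLAIM (what is proved, stated in full; the proofs are below) =====
def Claim_equal_calculate : Prop := ∀ (n : Int), Dom_calculate n → Spec_calculate n (calculate n)

-- ===== LEMMAS AND PROOFS =====

-- the stopping count: least k ≥ 0 with 2n ≤ (k+1)*(k+4)
def goodK (n k : Int) : Prop := 0 ≤ k ∧ 2 * n ≤ (k + 1) * (k + 4) ∧ (k = 0 ∨ k * (k + 3) < 2 * n)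

theorem goodK_unique (n k k' : Int) (h : goodK n k) (h' : goodK n k') : k = k' := by
  obtain ⟨hk0, hk1, hk2⟩ := h
  obtain ⟨hk0', hk1', hk2'⟩ := h'
  rcases lt_trichotomy k k' with hlt | heq | hgt
  · exfalso
    rcases hk2' with rfl | hB
    · omega
    · nlinarith
  · exact heq
  · exfalso
    rcases hk2 with rfl | hB
    · omega
    · nlinarith

-- partial sum i + (i+1) + … + (i+k-1)
def pSum (i : Int) (k : Nat) : Int := ((List.range k).map (fun (j : Nat) => i + (j : Int))).sum

theorem pSum_zero (i : Int) : pSum i 0 = 0 := by simp [pSum]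

theorem pSum_shift (i : Int) (k : Nat) : pSum i (k + 1) = i + pSum (i + 1) k := by
  induction k with
  | zero => simp [pSum, List.range_succ]
  | succ m ih =>
      have h1 : pSum i (m + 1 + 1) = pSum i (m + 1) + (i + (m + 1 : Nat)) := by
        simp [pSum, List.range_succ]; (try push_cast); (try ring)
      have h2 : pSum (i + 1) (m + 1) = pSum (i + 1) m + ((i + 1) + (m : Nat)) := by
        simp [pSum, List.range_succ]; (try push_cast); (try ring)
      rw [h1, ih, h2]; push_cast; ring

theorem pSum_gauss (k : Nat) : 2 * pSum 1 k = (k : Int) * ((k : Int) + 1) := by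
  induction k with
  | zero => simp [pSum]
  | succ m ih =>
      have h1 : pSum 1 (m + 1) = pSum 1 m + (1 + (m : Nat)) := by
        simp [pSum, List.range_succ]; (try push_cast); (try ring)
      rw [h1]; push_cast; push_cast at ih; nlinarith

theorem loopA_spec (n i : Int) (acc : List Int) (hi : 1 ≤ i) :
    ∃ k : Nat, calcLoopA n i acc
        = acc ++ (List.range k).map (fun (j : Nat) => i + (j : Int)) ++ [n - pSum i k]
      ∧ n - pSum i k ≤ 2 * (i + k)
      ∧ (k = 0 ∨ 2 * (i + (k : Int) - 1) < n - pSum i (k - 1)) := by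
  fun_induction calcLoopA n i acc with
  | case1 n i acc h ih =>
      obtain ⟨k', hlist, hstop, hlast⟩ := ih (by omega)
      refine ⟨k' + 1, ?_, ?_, ?_⟩
      · rw [hlist, pSum_shift]
        have hmap : (List.range (k' + 1)).map (fun (j : Nat) => i + (j : Int))
            = i :: (List.range k').map (fun (j : Nat) => (i + 1) + (j : Int)) := by
          rw [List.range_succ_eq_map, List.map_cons, List.map_map]
          simp only [Nat.cast_zero, add_zero]
          congr 1
          apply List.map_congr_left
          intro a _
          simp only [Function.comp_apply]
          push_cast
          ring
        rw [hmap]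
        simp [sub_sub]
      · rw [pSum_shift]; push_cast; push_cast at hstop; omega
      · right
        rcases Nat.eq_zero_or_pos k' with rfl | hk1
        · simp only [Nat.add_sub_cancel, pSum_zero]
          push_cast; omega
        · have hB := hlast.resolve_left (by omega)
          have hps : pSum i (k' + 1 - 1) = i + pSum (i + 1) (k' - 1) := by
            have he : k' + 1 - 1 = (k' - 1) + 1 := by omega
            rw [he, pSum_shift]
          rw [hps]
          push_cast at hB ⊢
          omega
  | case2 n i acc h =>
      refine ⟨0, ?_, ?_, Or.inl rfl⟩
      · simp [pSum_zero]
      · simp [pSum_zero]; omega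

theorem calculate_goodK (n : Int) :
    ∃ k : Nat, calculate n
        = (List.range k).map (fun (j : Nat) => 1 + (j : Int)) ++ [n - pSum 1 k]
      ∧ goodK n (k : Int) := by
  obtain ⟨k, hlist, hstop, hlast⟩ := loopA_spec n 1 [] (le_refl 1)
  refine ⟨k, by simpa [calculate] using hlist, ⟨by positivity, ?_, ?_⟩⟩
  · have hg := pSum_gauss k
    nlinarith
  · rcases Nat.eq_zero_or_pos k with rfl | hk1
    · left; rfl
    · right
      have hB := hlast.resolve_left (by omega)
      have hg := pSum_gauss (k - 1)
      have hc : ((k - 1 : Nat) : Int) = (k : Int) - 1 := by omega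
      rw [hc] at hg
      nlinarith

theorem findHiB_spec (n hi : Int) (h1 : 1 ≤ hi) :
    1 ≤ findHiB n hi ∧ 2 * n ≤ (findHiB n hi + 1) * (findHiB n hi + 4) := by
  fun_induction findHiB n hi with
  | case1 hi h ih => exact ih (by omega)
  | case2 hi h =>
      push_neg at h
      exact ⟨h1, le_of_not_gt (fun hc => absurd (h hc) (by omega))⟩

theorem bsearchB_spec (n lo hi : Int) (h0 : 0 ≤ lo) (hle : lo ≤ hi)
    (hhi : 2 * n ≤ (hi + 1) * (hi + 4)) (hlo : lo = 0 ∨ lo * (lo + 3) < 2 * n) :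
    goodK n (bsearchB n lo hi) := by
  fun_induction bsearchB n lo hi with
  | case1 lo hi h mid hc ih =>
      have hb := PySem.Int.floordiv_two_mid_bounds (lo := lo) (hi := hi) (le_of_lt h)
      exact ih h0 hb.1 hc hlo
  | case2 lo hi h mid hc ih =>
      have hb := PySem.Int.floordiv_two_mid_bounds (lo := lo) (hi := hi) (le_of_lt h)
      have hmlt : mid < hi := by
        have h2 : mid = (lo + hi) / 2 := PySem.Int.floordiv_eq_ediv_of_pos (by norm_num)
        omega
      refine ih (by omega) (by omega) hhi (Or.inr ?_)
      push_neg at hc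
      have : (mid + 1) * ((mid + 1) + 3) = (mid + 1) * (mid + 4) := by ring
      omega
  | case3 lo hi h =>
      have : lo = hi := by omega
      subst this
      exact ⟨h0, hhi, hlo⟩

theorem calculate_spec_aux (n : Int) : calculate n = calculate_alt n := by
  obtain ⟨k, hA, hgA⟩ := calculate_goodK n
  by_cases hn : n ≤ 2
  · have hk0 : (k : Int) = 0 := by
      apply goodK_unique n _ 0 hgA
      refine ⟨le_refl 0, by omega, Or.inl rfl⟩
    have : k = 0 := by exact_mod_cast hk0
    subst this
    rw [hA]
    simp [calculate_alt, hn, pSum_zero]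
  · push_neg at hn
    obtain ⟨hh1, hh2⟩ := findHiB_spec n 1 (le_refl 1)
    have hgB := bsearchB_spec n 0 (findHiB n 1) (le_refl 0) (by omega) hh2 (Or.inl rfl)
    have hkk : (k : Int) = bsearchB n 0 (findHiB n 1) := goodK_unique n _ _ hgA hgB
    rw [hA]
    simp only [calculate_alt, if_neg (by omega : ¬ n ≤ 2)]
    rw [← hkk]
    have hrange : PySem.List.pyRange 1 ((k : Int) + 1) 1
        = (List.range k).map (fun (j : Nat) => 1 + (j : Int)) := by
      have hkt : (((k : Int) + 1) - 1).toNat = k := by omega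
      rw [PySem.List.pyRange_one, hkt]
    have hdiv : PySem.Int.floordiv ((k : Int) * ((k : Int) + 1)) 2 = pSum 1 k := by
      have h2 : (k : Int) * ((k : Int) + 1) = 2 * pSum 1 k := (pSum_gauss k).symm
      rw [h2, PySem.Int.floordiv_eq_ediv_of_pos (by norm_num)]
      omega
    rw [hrange, hdiv]

-- ===== VERDICT (by name: the statement is the Claim_ definition above) =====
theorem calculate_spec : Claim_equal_calculate := by
  intro n _
  unfold Spec_calculate
  exact calculate_spec_aux n
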